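-- pv_equiv track=rewrite | github.com/AyushAgnihotri2025/CP-Solutions | GeeksforGeeks/Python3/Medium/Smallest Non-Zero Number/smallest-non-zero-number.py | find
-- ===== SOURCE A (Python) =====
-- def find(arr, n):
--     # Your code goes here
--     i = 0
--     flag = True
--     while flag:
--         i += 1
--         flag = False
--         num = i
--         for item in arr:
--             num = num*2 - item
--             if num < 0:
--                 flag = True
--                 break
--     return i
-- ===== SOURCE B (Python) =====
-- def find(arr, n):
--     # Right-to-left: g = minimal starting value that keeps the recurrence
--     # num -> 2*num - a nonnegative over the whole suffix; one O(len(arr)) pass.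
--     g = 0
--     for a in reversed(arr):
--         g = (max(a, a + g) + 1) // 2
--     return max(1, g)
-- ===== Notes on version B (the rewrite author's own statement) =====
-- stated objective: faster
-- what changed: Instead of testing candidates i=1,2,... each with a full scan, B computes in one reverse pass the minimal starting value g that keeps the recurrence num->2*num-a nonnegative (g' = ceil(max(a, a+g)/2)) and returns max(1,g).
import Mathlib
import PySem

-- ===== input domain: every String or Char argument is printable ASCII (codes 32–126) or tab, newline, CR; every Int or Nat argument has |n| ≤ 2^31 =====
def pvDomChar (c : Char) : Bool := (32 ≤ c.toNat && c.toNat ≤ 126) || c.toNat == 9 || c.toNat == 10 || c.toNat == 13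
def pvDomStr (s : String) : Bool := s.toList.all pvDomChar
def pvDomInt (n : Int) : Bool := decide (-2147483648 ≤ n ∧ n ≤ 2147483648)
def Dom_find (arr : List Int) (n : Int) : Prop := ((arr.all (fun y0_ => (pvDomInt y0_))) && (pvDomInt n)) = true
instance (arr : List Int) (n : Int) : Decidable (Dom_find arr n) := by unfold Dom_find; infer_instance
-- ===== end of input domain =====

-- B replaces A's try-every-candidate loop (O(answer*n)) with one reverse pass computing
-- the minimal safe starting value; equivalence of return values is proved for all inputs.

-- ===== PORT A =====
-- A's inner for-loop with break: true iff num never goes negative.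
def findOk (num : Int) (l : List Int) : Bool :=
  match l with
  | [] => true
  | a :: rest =>
    let num' := num * 2 - a
    if num' < 0 then false else findOk num' rest

-- termination bound for A's while loop: sum of the nonnegative entries
def findBound (l : List Int) : Int := (l.map (fun a => max a 0)).sum

theorem findBound_nonneg (l : List Int) : 0 ≤ findBound l := by
  induction l with
  | nil => simp [findBound]
  | cons a t ih => simp only [findBound, List.map_cons, List.sum_cons] at *; omega

theorem findOk_of_ge (l : List Int) : ∀ num : Int, findBound l ≤ num → findOk num l = true := by
  induction l with
  | nil => intro num _; rfl
  | cons a t ih =>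
    intro num h
    have hb := findBound_nonneg t
    simp only [findBound, List.map_cons, List.sum_cons] at h
    have h2 : findBound t ≤ num * 2 - a := by simp only [findBound] at *; omega
    have h3 : ¬ (num * 2 - a < 0) := by omega
    simp only [findOk, h3, if_false]
    exact ih _ h2

-- A's while loop: i += 1 at the top, retry while the scan went negative.
def findLoop (arr : List Int) (i : Int) : Int :=
  if findOk (i + 1) arr then i + 1 else findLoop arr (i + 1)
termination_by (findBound arr - i).toNat
decreasing_by
  have hnot : findOk (i + 1) arr = false := by
    rename_i h; simpa using h
  have : ¬ findBound arr ≤ i + 1 := by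
    intro hle
    rw [findOk_of_ge arr (i + 1) hle] at hnot
    simp at hnot
  omega

def find (arr : List Int) (n : Int) : Int := findLoop arr 0

-- ===== PORT B =====
def find_alt (arr : List Int) (n : Int) : Int :=
  max 1 (arr.reverse.foldl (fun g a => PySem.Int.floordiv (max a (a + g) + 1) 2) 0)

-- ===== PRECONDITION & SPEC =====
def Spec_find (arr : List Int) (n : Int) (out : Int) : Prop := out = find_alt arr n
instance (arr : List Int) (n : Int) (out : Int) : Decidable (Spec_find arr n out) := by unfold Spec_find; infer_instance

-- ===== CLAIM (what is proved, stated in full; the proofs are below) =====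
def Claim_equal_find : Prop := ∀ (arr : List Int) (n : Int), Dom_find arr n → Spec_find arr n (find arr n)

-- ===== LEMMAS AND PROOFS =====

-- the right fold B computes, written structurally
def gMin (l : List Int) : Int :=
  match l with
  | [] => 0
  | a :: t => (max a (a + gMin t) + 1).fdiv 2

theorem foldl_reverse_gMin (l : List Int) :
    l.reverse.foldl (fun g a => PySem.Int.floordiv (max a (a + g) + 1) 2) 0 = gMin l := by
  induction l with
  | nil => rfl
  | cons a t ih =>
    simp only [PySem.Int.floordiv] at ih ⊢
    rw [List.reverse_cons, List.foldl_append, List.foldl_cons, List.foldl_nil, ih]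
    rfl

theorem fdiv2_le_iff (x num : Int) : (x + 1).fdiv 2 ≤ num ↔ x ≤ num * 2 := by
  have h := Int.mul_fdiv_add_fmod (x + 1) 2
  have h1 : 0 ≤ (x + 1).fmod 2 := Int.fmod_nonneg_of_pos _ (by norm_num)
  have h2 : (x + 1).fmod 2 < 2 := Int.fmod_lt_of_pos _ (by norm_num)
  omega

-- characterisation of A's scan: for nonnegative num it succeeds iff num ≥ gMin l
theorem findOk_iff (l : List Int) : ∀ num : Int, 0 ≤ num → (findOk num l = true ↔ gMin l ≤ num) := by
  induction l with
  | nil => intro num h; simp [findOk, gMin]; omega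
  | cons a t ih =>
    intro num h
    simp only [findOk, gMin]
    by_cases hneg : num * 2 - a < 0
    · simp only [hneg, if_true]
      rw [fdiv2_le_iff]
      constructor
      · intro hfalse; exact absurd hfalse (by simp)
      · intro hle; omega
    · simp only [hneg, if_false]
      rw [ih (num * 2 - a) (by omega), fdiv2_le_iff]
      omega

theorem findLoop_eq (arr : List Int) : ∀ (k : Nat) (i : Int), 0 ≤ i →
    (max 1 (gMin arr) - 1 - i).toNat = k → i ≤ max 1 (gMin arr) - 1 →
    findLoop arr i = max 1 (gMin arr) := by
  intro k
  induction k with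
  | zero =>
    intro i h0 hk hle
    have hi : i = max 1 (gMin arr) - 1 := by omega
    rw [findLoop]
    have hok : findOk (i + 1) arr = true := by
      rw [findOk_iff arr (i + 1) (by omega)]; omega
    rw [hok]
    simp only [if_true]
    omega
  | succ k ih =>
    intro i h0 hk hle
    rw [findLoop]
    have hok : findOk (i + 1) arr = false := by
      rw [Bool.eq_false_iff, Ne, findOk_iff arr (i + 1) (by omega)]
      omega
    rw [hok]
    simp only [Bool.false_eq_true, if_false]
    exact ih (i + 1) (by omega) (by omega) (by omega)

-- ===== VERDICT (by name: the statement is the Claim_ definition above) =====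
theorem find_spec : Claim_equal_find := by
  intro arr n _
  show find arr n = find_alt arr n
  rw [find, find_alt, foldl_reverse_gMin,
    findLoop_eq arr (max 1 (gMin arr) - 1 - 0).toNat 0 le_rfl rfl (by omega)]
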